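-- pv_equiv track=rewrite | github.com/whereismyguts/rest | app/weather_service/info/controller.py | is_temp_crossing_zero
-- ===== SOURCE A (Python) =====
-- def is_temp_crossing_zero(temp_list):
--     prev_sign = None
--     for tmp in temp_list:
--         if tmp == 0:
--             return True
--
--         sign = tmp > 0 - tmp < 0
--         if prev_sign is not None:
--             if sign != prev_sign:
--                 return True
--         prev_sign = sign
--     return False
-- ===== SOURCE B (Python) =====
-- def is_temp_crossing_zero(temp_list):
--     return 0 in temp_list or (any(t > 0 for t in temp_list) and any(t < 0 for t in temp_list))
-- ===== Notes on version B (the rewrite author's own statement) =====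
-- stated objective: simpler
-- what changed: Replaced the adjacent-sign-change scan with previous-sign state by a stateless existence test: the result is True iff the list contains a zero, or contains both a positive and a negative element.
import Mathlib
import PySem

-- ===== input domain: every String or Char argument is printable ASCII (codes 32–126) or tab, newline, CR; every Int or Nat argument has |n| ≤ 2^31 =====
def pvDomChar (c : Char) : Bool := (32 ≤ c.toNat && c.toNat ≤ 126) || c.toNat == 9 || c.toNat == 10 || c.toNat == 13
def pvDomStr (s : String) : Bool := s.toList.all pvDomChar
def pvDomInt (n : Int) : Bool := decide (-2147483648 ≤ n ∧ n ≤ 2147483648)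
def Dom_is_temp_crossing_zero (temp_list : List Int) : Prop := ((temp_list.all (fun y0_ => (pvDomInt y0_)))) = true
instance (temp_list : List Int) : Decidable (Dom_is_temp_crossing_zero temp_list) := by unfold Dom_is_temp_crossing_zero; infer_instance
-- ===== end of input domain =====

-- B replaces A's adjacent-sign-change scan (with previous-sign state) by a stateless
-- existence test: zero present, or both a positive and a negative element present. Objective: simpler.

-- ===== PORT A =====
-- A's loop with its `prev_sign` state (None before the first nonzero element);
-- `tmp > 0 - tmp < 0` is Python's chained comparison: (tmp > 0 - tmp) and (0 - tmp < 0).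
def pvGoA : List Int → Option Bool → Bool
  | [], _ => false
  | tmp :: rest, prev_sign =>
    if tmp = 0 then true
    else
      let sign := decide (tmp > 0 - tmp) && decide (0 - tmp < 0)
      match prev_sign with
      | some p => if sign != p then true else pvGoA rest (some sign)
      | none => pvGoA rest (some sign)

def is_temp_crossing_zero (temp_list : List Int) : Bool :=
  pvGoA temp_list none

-- ===== PORT B =====
def is_temp_crossing_zero_alt (temp_list : List Int) : Bool :=
  temp_list.contains 0 ||
    (temp_list.any (fun t => decide (t > 0)) && temp_list.any (fun t => decide (t < 0)))

-- ===== PRECONDITION & SPEC =====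
def Spec_is_temp_crossing_zero (temp_list : List Int) (out : Bool) : Prop := out = is_temp_crossing_zero_alt temp_list
instance (temp_list : List Int) (out : Bool) : Decidable (Spec_is_temp_crossing_zero temp_list out) := by unfold Spec_is_temp_crossing_zero; infer_instance

-- ===== CLAIM (what is proved, stated in full; the proofs are below) =====
def Claim_equal_is_temp_crossing_zero : Prop := ∀ (temp_list : List Int), Dom_is_temp_crossing_zero temp_list → Spec_is_temp_crossing_zero temp_list (is_temp_crossing_zero temp_list)

-- ===== LEMMAS AND PROOFS =====

-- The chained comparison computes the sign test `0 < tmp`.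
lemma pvSign_eq (t : Int) : (decide (t > 0 - t) && decide (0 - t < 0)) = decide (0 < t) := by
  by_cases h : (0 : Int) < t <;> simp [h]

-- With a previous sign p fixed, A's loop is a plain search: it succeeds exactly at an
-- element that is zero or whose sign differs from p.
lemma pvGoA_some (l : List Int) (p : Bool) :
    pvGoA l (some p) = l.any (fun x => decide (x = 0) || (decide (0 < x) != p)) := by
  induction l with
  | nil => simp [pvGoA]
  | cons t rest ih =>
    by_cases ht : t = 0
    · simp [pvGoA, ht]
    · simp only [pvGoA, if_neg ht, pvSign_eq, List.any_cons]
      by_cases hs : decide (0 < t) = p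
      · simp [hs, ht, ih]
      · simp [hs, ht]

-- ===== VERDICT (by name: the statement is the Claim_ definition above) =====
theorem is_temp_crossing_zero_spec : Claim_equal_is_temp_crossing_zero := by
  intro l _
  unfold Spec_is_temp_crossing_zero is_temp_crossing_zero is_temp_crossing_zero_alt
  cases l with
  | nil => simp [pvGoA]
  | cons t rest =>
    by_cases ht : t = 0
    · simp [pvGoA, ht]
    · simp only [pvGoA, if_neg ht, pvSign_eq]
      rw [pvGoA_some, Bool.eq_iff_iff]
      by_cases hp : 0 < t
      · simp [List.any_eq_true, hp, not_lt]
        constructor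
        · rintro ⟨x, hx, h⟩
          by_cases hx0 : x = 0
          · exact Or.inl (Or.inr (hx0 ▸ hx))
          · exact Or.inr (Or.inr ⟨x, hx, by omega⟩)
        · rintro ((h | h) | h | ⟨x, hx, h⟩)
          · omega
          · exact ⟨0, h, Or.inl rfl⟩
          · omega
          · exact ⟨x, hx, by omega⟩
      · simp [List.any_eq_true, hp]
        constructor
        · rintro ⟨x, hx, h⟩
          by_cases hx0 : x = 0
          · exact Or.inl (Or.inr (hx0 ▸ hx))
          · exact Or.inr ⟨⟨x, hx, by omega⟩, Or.inl (by omega)⟩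
        · rintro ((h | h) | ⟨⟨x, hx, h⟩, _⟩)
          · omega
          · exact ⟨0, h, Or.inl rfl⟩
          · exact ⟨x, hx, by omega⟩
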